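-- pv_equiv track=rewrite | github.com/jeh027/Miscellaneous-Recursion | Recursion Project.py | place_matches
-- ===== SOURCE A (Python) =====
-- def place_matches(possible, wishes):
--     """
--     This function takes in two arguments: a list of strings representing
--     places that you may potential visit and another list containing
--     all the place you'd wish to visit. The function seeks to find
--     commonality among both these lists. At the end, the function
--     returns the number of places that you can and wish to visit as
--     an integer.
--     """
--
--     if len(wishes) == 0:
--         return 0
--     if len(wishes) == 1:
--         if wishes[0] in possible:
--             return 1
--         return 0
--     else:
--         if wishes[0] in possible:
--             return 1 + place_matches(possible, wishes[1:])
--         else: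
--             return 0 + place_matches(possible, wishes[1:])
-- ===== SOURCE B (Python) =====
-- def place_matches(possible, wishes):
--     count = 0
--     for w in wishes:
--         if w in possible:
--             count += 1
--     return count
-- ===== Notes on version B (the rewrite author's own statement) =====
-- stated objective: simpler
-- what changed: Replaces the slicing recursion (with its special empty/singleton base cases) by a single iterative loop over wishes with a counter.
import Mathlib
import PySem

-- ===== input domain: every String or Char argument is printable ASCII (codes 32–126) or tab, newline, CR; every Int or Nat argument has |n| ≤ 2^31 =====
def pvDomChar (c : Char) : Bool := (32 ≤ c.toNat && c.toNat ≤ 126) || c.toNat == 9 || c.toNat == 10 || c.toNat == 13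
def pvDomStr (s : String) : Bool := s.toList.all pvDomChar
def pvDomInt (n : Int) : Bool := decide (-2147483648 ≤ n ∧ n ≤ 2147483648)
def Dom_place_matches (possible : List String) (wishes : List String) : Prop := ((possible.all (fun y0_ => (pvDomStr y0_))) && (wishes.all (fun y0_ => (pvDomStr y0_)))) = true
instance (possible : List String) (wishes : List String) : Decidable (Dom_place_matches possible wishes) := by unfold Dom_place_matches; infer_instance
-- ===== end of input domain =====

-- B replaces A's slicing recursion by a plain iterative counting loop (objective: simpler).

-- ===== PORT A =====
-- literal transliteration of A: base cases for len 0 / len 1, else recurse on wishes[1:]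
def place_matches (possible : List String) (wishes : List String) : Int :=
  if wishes.length = 0 then 0
  else if wishes.length = 1 then
    (if wishes[0]! ∈ possible then 1 else 0)
  else
    if wishes[0]! ∈ possible then
      1 + place_matches possible (PySem.List.slice wishes (some 1) none)
    else
      0 + place_matches possible (PySem.List.slice wishes (some 1) none)
termination_by wishes.length
decreasing_by
  all_goals simp [PySem.List.slice_from_one]; omega

-- ===== PORT B =====
-- literal transliteration of B: count = 0; for w in wishes: if w in possible: count += 1
def place_matches_alt (possible : List String) (wishes : List String) : Int :=
  wishes.foldl (fun count w => if w ∈ possible then count + 1 else count) 0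

-- ===== PRECONDITION & SPEC =====
def Spec_place_matches (possible : List String) (wishes : List String) (out : Int) : Prop := out = place_matches_alt possible wishes
instance (possible : List String) (wishes : List String) (out : Int) : Decidable (Spec_place_matches possible wishes out) := by unfold Spec_place_matches; infer_instance

-- ===== CLAIM (what is proved, stated in full; the proofs are below) =====
def Claim_equal_place_matches : Prop := ∀ (possible : List String) (wishes : List String), Dom_place_matches possible wishes → Spec_place_matches possible wishes (place_matches possible wishes)

-- ===== LEMMAS AND PROOFS =====

theorem foldl_count_shift (possible : List String) (ws : List String) (c : Int) :
    ws.foldl (fun count w => if w ∈ possible then count + 1 else count) c =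
      c + ws.foldl (fun count w => if w ∈ possible then count + 1 else count) 0 := by
  induction ws generalizing c with
  | nil => simp
  | cons w ws ih =>
    simp only [List.foldl_cons]
    rw [ih, ih (if w ∈ possible then 0 + 1 else 0)]
    split_ifs <;> ring

theorem place_matches_alt_cons (possible : List String) (w : String) (ws : List String) :
    place_matches_alt possible (w :: ws) =
      (if w ∈ possible then 1 else 0) + place_matches_alt possible ws := by
  unfold place_matches_alt
  simp only [List.foldl_cons]
  rw [foldl_count_shift]
  split_ifs <;> ring

theorem place_matches_eq (possible : List String) (wishes : List String) :
    place_matches possible wishes = place_matches_alt possible wishes := by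
  induction wishes with
  | nil => simp [place_matches, place_matches_alt]
  | cons w ws ih =>
    rw [place_matches]
    rcases ws with _ | ⟨w2, ws2⟩
    · simp [place_matches_alt]
    · have hslice : PySem.List.slice (w :: w2 :: ws2) (some 1) none = w2 :: ws2 := by
        simp [PySem.List.slice_from_one]
      simp only [List.length_cons, hslice, List.getElem!_cons_zero] at *
      rw [place_matches_alt_cons]
      split_ifs with h <;> simp_all

-- ===== VERDICT (by name: the statement is the Claim_ definition above) =====
theorem place_matches_spec : Claim_equal_place_matches := by
  intro possible wishes _
  unfold Spec_place_matches
  exact place_matches_eq possible wishes
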